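-- pv_equiv track=rewrite | github.com/rba100/cluster-vis | api_getthemes.py | chooseK
-- ===== SOURCE A (Python) =====
-- def chooseK(size: int):
--     kMap = {
--         5: 2,
--         10: 3,
--         50: 5,
--         200: 15,
--         2000: 25
--     }
--
--     keys = list(kMap.keys())
--     keys.sort()
--     k = 35
--     for key in keys:
--         if size <= key:
--             k = kMap[key]
--             break
--     return k
-- ===== SOURCE B (Python) =====
-- import bisect
--
-- _KEYS = [5, 10, 50, 200, 2000]
-- _VALS = [2, 3, 5, 15, 25]
--
-- def chooseK(size: int):
--     idx = bisect.bisect_left(_KEYS, size)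
--     return _VALS[idx] if idx < len(_KEYS) else 35
-- ===== Notes on version B (the rewrite author's own statement) =====
-- stated objective: idiomatic
-- what changed: Replaces the dict-build, key-sort and linear scan-with-break by a binary search (bisect_left) over a fixed sorted threshold list with a parallel value list.
import Mathlib
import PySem

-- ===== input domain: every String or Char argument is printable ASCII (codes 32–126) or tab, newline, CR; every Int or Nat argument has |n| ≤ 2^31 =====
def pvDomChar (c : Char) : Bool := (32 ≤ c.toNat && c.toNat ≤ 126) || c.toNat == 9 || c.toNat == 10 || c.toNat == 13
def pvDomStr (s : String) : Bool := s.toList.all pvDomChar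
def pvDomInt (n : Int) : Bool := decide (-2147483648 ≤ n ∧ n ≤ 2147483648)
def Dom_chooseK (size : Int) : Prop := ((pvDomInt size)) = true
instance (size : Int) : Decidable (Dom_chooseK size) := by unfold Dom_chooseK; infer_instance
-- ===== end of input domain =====

-- B replaces A's dict-build + sort + linear scan-with-break by a bisect_left binary
-- search over a fixed sorted threshold list (idiomatic; same result, no speed claim).

-- ===== PORT A =====
-- the dict literal, in insertion order
def chooseK_kMap : PySem.Dict Int Int :=
  (((((PySem.Dict.empty.insert 5 2).insert 10 3).insert 50 5).insert 200 15).insert 2000 25)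

-- the for-loop with break: first key with size ≤ key sets k and stops
def chooseK_loop (size : Int) (keys : List Int) (k : Int) : Int :=
  match keys with
  | [] => k
  | key :: rest =>
      if size ≤ key then chooseK_kMap.getD key 0
      else chooseK_loop size rest k

def chooseK (size : Int) : Int :=
  chooseK_loop size (PySem.List.sorted chooseK_kMap.keys id) 35

-- ===== PORT B =====
def chooseK_alt_keys : List Int := [5, 10, 50, 200, 2000]
def chooseK_alt_vals : List Int := [2, 3, 5, 15, 25]

-- bisect.bisect_left on the sorted key list = number of elements < size
def chooseK_alt_bisectLeft (keys : List Int) (size : Int) : Nat :=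
  (keys.takeWhile (· < size)).length

def chooseK_alt (size : Int) : Int :=
  let idx := chooseK_alt_bisectLeft chooseK_alt_keys size
  if _h : idx < chooseK_alt_keys.length then chooseK_alt_vals.getD idx 0 else 35

-- ===== PRECONDITION & SPEC =====
def Spec_chooseK (size : Int) (out : Int) : Prop := out = chooseK_alt size
instance (size : Int) (out : Int) : Decidable (Spec_chooseK size out) := by unfold Spec_chooseK; infer_instance

-- ===== CLAIM (what is proved, stated in full; the proofs are below) =====
def Claim_equal_chooseK : Prop := ∀ (size : Int), Dom_chooseK size → Spec_chooseK size (chooseK size)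

-- ===== LEMMAS AND PROOFS =====

-- ===== VERDICT (by name: the statement is the Claim_ definition above) =====
theorem chooseK_spec : Claim_equal_chooseK := by
  intro size _
  have hk : PySem.List.sorted chooseK_kMap.keys id = [5, 10, 50, 200, 2000] := by decide
  unfold Spec_chooseK chooseK chooseK_alt chooseK_alt_bisectLeft chooseK_alt_keys chooseK_alt_vals
  rw [hk]
  by_cases h5 : size ≤ 5 <;> by_cases h10 : size ≤ 10 <;> by_cases h50 : size ≤ 50 <;>
    by_cases h200 : size ≤ 200 <;> by_cases h2000 : size ≤ 2000 <;>
    simp [chooseK_loop, chooseK_kMap, PySem.Dict.getD, PySem.Dict.get?, PySem.Dict.insert, PySem.Dict.empty,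
      List.takeWhile, h5, h10, h50, h200, h2000, show (5:Int) < size ↔ ¬ size ≤ 5 by omega,
      show (10:Int) < size ↔ ¬ size ≤ 10 by omega, show (50:Int) < size ↔ ¬ size ≤ 50 by omega,
      show (200:Int) < size ↔ ¬ size ≤ 200 by omega, show (2000:Int) < size ↔ ¬ size ≤ 2000 by omega] <;>
    omega
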